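-- pv_equiv track=rewrite | github.com/nicoWillemet18/Programacion1 | Práctico5/funciones.py | space_between
-- ===== SOURCE A (Python) =====
-- def space_between(phrase):
--     spaces = ""
--     for letter in phrase:
--         if letter != " ":
--             spaces += letter + " "
--         else:
--             spaces += letter
--     return spaces
-- ===== SOURCE B (Python) =====
-- import re
--
-- def space_between(phrase):
--     return re.sub(r'([^ ])', r'\1 ', phrase)
-- ===== Notes on version B (the rewrite author's own statement) =====
-- stated objective: idiomatic
-- what changed: Replaced the explicit character-accumulation loop with a single regex substitution that appends a space after every non-space character.
import Mathlib
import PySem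

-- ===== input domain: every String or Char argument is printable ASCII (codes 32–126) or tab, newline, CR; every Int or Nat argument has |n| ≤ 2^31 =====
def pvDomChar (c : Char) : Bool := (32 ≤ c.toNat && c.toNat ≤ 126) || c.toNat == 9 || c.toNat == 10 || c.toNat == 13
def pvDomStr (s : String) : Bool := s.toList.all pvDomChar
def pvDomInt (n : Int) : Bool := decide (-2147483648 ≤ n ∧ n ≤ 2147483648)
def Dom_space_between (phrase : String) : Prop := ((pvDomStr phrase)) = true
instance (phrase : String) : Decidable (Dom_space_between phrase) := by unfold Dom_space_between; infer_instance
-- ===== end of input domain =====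

-- B replaces A's per-character accumulation loop with a single regex substitution
-- appending a space after every non-space character (objective: idiomatic).


-- ===== PORT A =====
-- A iterates over the characters, growing an accumulator string; the accumulator
-- is kept as a List Char (strings are built on the list side per PySem convention).
def space_between (phrase : String) : String :=
  String.ofList (phrase.toList.foldl
    (fun spaces letter =>
      if letter ≠ ' ' then spaces ++ [letter, ' '] else spaces ++ [letter])
    [])

-- ===== PORT B =====
-- Source B's re.sub(r'([^ ])', r'\1 ', phrase): the pattern matches each single
-- non-space character and replaces it by itself followed by a space; spaces are
-- left untouched.  This per-character substitution is exactly a flatMap.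
def space_between_alt (phrase : String) : String :=
  String.ofList (phrase.toList.flatMap (fun c => if c = ' ' then [c] else [c, ' ']))

-- ===== PRECONDITION & SPEC =====
def Spec_space_between (phrase : String) (out : String) : Prop := out = space_between_alt phrase
instance (phrase : String) (out : String) : Decidable (Spec_space_between phrase out) := by unfold Spec_space_between; infer_instance

-- ===== CLAIM (what is proved, stated in full; the proofs are below) =====
def Claim_equal_space_between : Prop := ∀ (phrase : String), Dom_space_between phrase → Spec_space_between phrase (space_between phrase)

-- ===== LEMMAS AND PROOFS =====
theorem space_between_fold_eq (l : List Char) (acc : List Char) :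
    l.foldl (fun spaces letter =>
      if letter ≠ ' ' then spaces ++ [letter, ' '] else spaces ++ [letter]) acc
    = acc ++ l.flatMap (fun c => if c = ' ' then [c] else [c, ' ']) := by
  induction l generalizing acc with
  | nil => simp
  | cons c t ih =>
    rw [List.foldl_cons, List.flatMap_cons]
    by_cases h : c = ' '
    · rw [if_neg (by simp [h]), ih]; simp [h]
    · rw [if_pos (by simp [h]), ih]; simp [h]

-- ===== VERDICT (by name: the statement is the Claim_ definition above) =====
theorem space_between_spec : Claim_equal_space_between := by
  intro phrase _
  unfold Spec_space_between space_between space_between_alt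
  rw [space_between_fold_eq]
  simp
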